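-- pv_equiv track=rewrite | github.com/MrFlynn/course-code | mock_interview/interview.py | combineStores
-- ===== SOURCE A (Python) =====
-- from typing import Mapping, Tuple
--
-- Store = Mapping[str, Tuple[int, str]]
--
-- def combineStores(x: Store, y: Store) -> Store:
--     m: Store = {}
--
--     def iterStore(s: Store) -> None:
--         for k, v in s.items():
--             if k in m:
--                 m[k] = (m[k][0] + v[0], v[1])
--             else:
--                 m[k] = (v[0], v[1])
--
--     iterStore(x)
--     iterStore(y)
--
--     return m
-- ===== SOURCE B (Python) =====
-- from typing import Mapping, Tuple
--
-- Store = Mapping[str, Tuple[int, str]]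
--
-- def combineStores(x: Store, y: Store) -> Store:
--     keys = list(x) + [k for k in y if k not in x]
--     return {k: ((x[k][0] if k in x else 0) + (y[k][0] if k in y else 0),
--                 y[k][1] if k in y else x[k][1])
--             for k in keys}
-- ===== Notes on version B (the rewrite author's own statement) =====
-- stated objective: simpler
-- what changed: Replaces A's two sequential accumulate/override passes over a mutable dict by a single pass over the union of keys, resolving each key independently (quantity = x-part + y-part, string from y if present else x).
import Mathlib
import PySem

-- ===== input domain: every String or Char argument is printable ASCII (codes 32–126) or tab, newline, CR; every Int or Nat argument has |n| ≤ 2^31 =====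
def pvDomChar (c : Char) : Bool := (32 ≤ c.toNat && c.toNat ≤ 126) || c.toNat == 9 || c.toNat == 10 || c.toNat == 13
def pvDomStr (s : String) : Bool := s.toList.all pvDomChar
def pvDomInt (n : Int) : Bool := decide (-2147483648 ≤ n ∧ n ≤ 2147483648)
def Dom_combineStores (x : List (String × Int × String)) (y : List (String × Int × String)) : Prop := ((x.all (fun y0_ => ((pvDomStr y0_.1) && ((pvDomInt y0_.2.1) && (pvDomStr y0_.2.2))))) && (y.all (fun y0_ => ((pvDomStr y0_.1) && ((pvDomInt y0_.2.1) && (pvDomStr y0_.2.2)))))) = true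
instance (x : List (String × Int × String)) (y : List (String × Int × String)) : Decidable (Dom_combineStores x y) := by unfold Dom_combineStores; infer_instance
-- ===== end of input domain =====

-- B replaces A's two sequential accumulate/override passes by one pass over the union
-- of the keys, resolving each key independently (objective: simpler).

-- ===== PORT A =====
-- the inner helper iterStore of A: one pass over s.items() updating the dict m
def combineStoresIter (m : PySem.Dict String (Int × String)) (s : List (String × Int × String)) : PySem.Dict String (Int × String) :=
  s.foldl (fun m kv =>
    match m.get? kv.1 with
    | some w => m.insert kv.1 (w.1 + kv.2.1, kv.2.2)
    | none   => m.insert kv.1 (kv.2.1, kv.2.2)) m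

def combineStores (x : List (String × Int × String)) (y : List (String × Int × String)) : List (String × Int × String) :=
  (combineStoresIter (combineStoresIter PySem.Dict.empty x) y).items

-- ===== PORT B =====
def combineStores_alt (x : List (String × Int × String)) (y : List (String × Int × String)) : List (String × Int × String) :=
  let dx := PySem.Dict.mk x
  let dy := PySem.Dict.mk y
  let keys := dx.keys ++ dy.keys.filter (fun k => !(dx.contains k))
  keys.map (fun k =>
    (k, ((if dx.contains k then (dx.getD k (0, "")).1 else 0) +
         (if dy.contains k then (dy.getD k (0, "")).1 else 0),
         if dy.contains k then (dy.getD k (0, "")).2 else (dx.getD k (0, "")).2)))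

-- ===== PRECONDITION & SPEC =====
-- Pre_ requires the keys within each association list to be distinct: the Python
-- arguments are dicts, which cannot carry a duplicate key, so duplicate-key lists
-- correspond to no Python input at all.
def Pre_combineStores (x : List (String × Int × String)) (y : List (String × Int × String)) : Prop :=
  (x.map Prod.fst).Nodup ∧ (y.map Prod.fst).Nodup
instance (x : List (String × Int × String)) (y : List (String × Int × String)) : Decidable (Pre_combineStores x y) := by unfold Pre_combineStores; infer_instance

def pvWitness_combineStores : (List (String × Int × String)) × (List (String × Int × String)) :=
  ([("a", (1, "u")), ("c", (4, "t"))], [("a", (2, "v")), ("b", (3, "w"))])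

def Spec_combineStores (x : List (String × Int × String)) (y : List (String × Int × String)) (out : List (String × Int × String)) : Prop := out = combineStores_alt x y
instance (x : List (String × Int × String)) (y : List (String × Int × String)) (out : List (String × Int × String)) : Decidable (Spec_combineStores x y out) := by unfold Spec_combineStores; infer_instance

-- ===== CLAIM (what is proved, stated in full; the proofs are below) =====
def Claim_equal_combineStores : Prop := ∀ (x : List (String × Int × String)) (y : List (String × Int × String)), Dom_combineStores x y → Pre_combineStores x y → Spec_combineStores x y (combineStores x y)

-- ===== LEMMAS AND PROOFS =====

-- the per-entry effect of A's second pass on an entry already in m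
def pvMerge (s : List (String × Int × String)) (e : String × Int × String) : String × Int × String :=
  match (PySem.Dict.mk s).get? e.1 with
  | some w => (e.1, (e.2.1 + w.1, w.2))
  | none   => e

theorem pvMerge_nil (e : String × Int × String) : pvMerge [] e = e := by
  simp [pvMerge, PySem.Dict.get?]

theorem iter_items : ∀ (s : List (String × Int × String)) (m : PySem.Dict String (Int × String)),
    (s.map Prod.fst).Nodup → m.keys.Nodup →
    (combineStoresIter m s).items
      = m.items.map (pvMerge s) ++ s.filter (fun e => !(m.contains e.1)) := by
  intro s
  induction s with
  | nil =>
      intro m _ _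
      simp only [combineStoresIter, List.foldl_nil, List.filter_nil, List.append_nil]
      have h1 : List.map (pvMerge []) m.items = List.map id m.items :=
        List.map_congr_left (fun e _ => pvMerge_nil e)
      rw [h1, List.map_id]
  | cons kv t ih =>
      rcases kv with ⟨k, w⟩
      intro m hs hm
      simp only [List.map_cons, List.nodup_cons, List.mem_map] at hs
      obtain ⟨hknot, ht⟩ := hs
      have hknotmem : k ∉ t.map Prod.fst := by
        intro hmem
        rcases List.mem_map.mp hmem with ⟨e, he, hek⟩
        exact hknot ⟨e, he, hek⟩
      have hstep : combineStoresIter m ((k, w) :: t)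
          = combineStoresIter
              (match m.get? k with
               | some v => m.insert k (v.1 + w.1, w.2)
               | none   => m.insert k (w.1, w.2)) t := rfl
      have hget_t : (PySem.Dict.mk t).get? k = none := by
        rw [PySem.Dict.get?_eq_none_iff_not_mem_keys]
        simpa [PySem.Dict.keys_mk] using hknotmem
      have hfilne : ∀ (u : Int × String), ∀ e ∈ t,
          (!(m.insert k u).contains e.1) = (!(m.contains e.1)) := by
        intro u e he
        have : e.1 ≠ k := by
          intro h; exact hknotmem (List.mem_map.mpr ⟨e, he, h⟩)
        simp [PySem.Dict.contains_insert, this]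
      cases hmk : m.get? k with
      | some v =>
          have hc : m.contains k = true := by
            rw [PySem.Dict.contains_eq_isSome_get?, hmk]; rfl
          have hm' : (m.insert k (v.1 + w.1, w.2)).keys.Nodup :=
            PySem.Dict.nodup_keys_insert _ _ _ hm
          rw [hstep, hmk]
          rw [ih _ ht hm']
          rw [PySem.Dict.items_insert_of_contains _ _ hc, List.map_map]
          congr 1
          · apply List.map_congr_left
            intro p hp
            obtain ⟨p1, p2⟩ := p
            by_cases hpk : p1 = k
            · have hpl : m.get? p1 = some p2 := PySem.Dict.get?_of_mem_items _ hp hm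
              rw [hpk] at hpl
              rw [hmk] at hpl
              have hpv : p2 = v := (Option.some.inj hpl).symm
              simp [Function.comp, hpk, pvMerge, hget_t, PySem.Dict.get?_mk_cons, hpv]
            · have hne : (p1 == k) = false := by simp [hpk]
              simp [Function.comp, hne, pvMerge, PySem.Dict.get?_mk_cons , Ne.symm hpk]
          · rw [List.filter_congr (hfilne _)]
            simp [hc]
      | none =>
          have hc : m.contains k = false := by
            rw [PySem.Dict.contains_eq_isSome_get?, hmk]; rfl
          have hknotkeys : k ∉ m.keys := by
            intro h
            rw [← PySem.Dict.contains_iff_mem_keys] at h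
            rw [hc] at h; exact Bool.false_ne_true h
          have hm' : (m.insert k (w.1, w.2)).keys.Nodup :=
            PySem.Dict.nodup_keys_insert _ _ _ hm
          rw [hstep, hmk]
          rw [ih _ ht hm']
          rw [PySem.Dict.items_insert_of_not_contains _ _ hc]
          rw [List.map_append, List.append_assoc]
          congr 1
          · apply List.map_congr_left
            intro p hp
            have hpk : p.1 ≠ k := by
              intro h
              exact hknotkeys (h ▸ PySem.Dict.mem_keys_of_mem_items _ hp)
            simp [pvMerge, PySem.Dict.get?_mk_cons, Ne.symm hpk]
          · have hsingle : [(k, w)].map (pvMerge t) = [(k, w)] := by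
              simp [pvMerge, hget_t]
            rw [hsingle, List.filter_congr (hfilne _)]
            simp [hc]

theorem iter_empty (x : List (String × Int × String)) (hx : (x.map Prod.fst).Nodup) :
    combineStoresIter PySem.Dict.empty x = PySem.Dict.mk x := by
  apply PySem.Dict.ext
  have h := iter_items x PySem.Dict.empty hx (by simp)
  simpa [pvMerge] using h

theorem combineStores_spec : Claim_equal_combineStores := by
  unfold Claim_equal_combineStores
  intro x y _ hpre
  obtain ⟨hx, hy⟩ := hpre
  unfold Spec_combineStores
  have hA : combineStores x y
      = x.map (pvMerge y) ++ y.filter (fun e => !((PySem.Dict.mk x).contains e.1)) := by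
    unfold combineStores
    rw [iter_empty x hx]
    have := iter_items y (PySem.Dict.mk x) hy (by simpa [PySem.Dict.keys_mk] using hx)
    simpa using this
  rw [hA]
  unfold combineStores_alt
  simp only [PySem.Dict.keys_mk, List.map_append, List.map_map]
  congr 1
  · -- keys of x
    apply List.map_congr_left
    intro e he
    have hxc : (PySem.Dict.mk x).contains e.1 = true := by
      rw [PySem.Dict.contains_iff_mem_keys]
      simp only [PySem.Dict.keys_mk]
      exact List.mem_map.mpr ⟨e, he, rfl⟩
    have hxget : (PySem.Dict.mk x).get? e.1 = some e.2 := by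
      apply PySem.Dict.get?_of_mem_items
      · simpa using he
      · simpa [PySem.Dict.keys_mk] using hx
    have hxgd : (PySem.Dict.mk x).getD e.1 (0, "") = e.2 :=
      PySem.Dict.getD_of_get?_eq_some _ _ hxget
    cases hyk : (PySem.Dict.mk y).get? e.1 with
    | some w =>
        have hyc : (PySem.Dict.mk y).contains e.1 = true := by
          rw [PySem.Dict.contains_eq_isSome_get?, hyk]; rfl
        have hygd : (PySem.Dict.mk y).getD e.1 (0, "") = w :=
          PySem.Dict.getD_of_get?_eq_some _ _ hyk
        have hxa : (x.any fun p => p.1 == e.1) = true := by simpa using hxc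
        have hya : (y.any fun p => p.1 == e.1) = true := by simpa using hyc
        simp only [pvMerge, hyk]
        simp [hxa, hya, hxgd, hygd]
    | none =>
        have hyc : (PySem.Dict.mk y).contains e.1 = false := by
          rw [PySem.Dict.contains_eq_isSome_get?, hyk]; rfl
        have hxa : (x.any fun p => p.1 == e.1) = true := by simpa using hxc
        have hya : (y.any fun p => p.1 == e.1) = false := by simpa using hyc
        simp only [pvMerge, hyk]
        simp [hxa, hya, hxgd]
  · -- new keys of y
    symm
    rw [List.filter_map, List.map_map]
    conv_rhs => rw [← List.map_id (List.filter (fun e => !((PySem.Dict.mk x).contains e.1)) y)]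
    apply List.map_congr_left
    intro e he
    rw [List.mem_filter] at he
    obtain ⟨hey, hef⟩ := he
    have hxc : (PySem.Dict.mk x).contains e.1 = false := by
      simpa using hef
    have hyget : (PySem.Dict.mk y).get? e.1 = some e.2 := by
      apply PySem.Dict.get?_of_mem_items
      · simpa using hey
      · simpa [PySem.Dict.keys_mk] using hy
    have hyc : (PySem.Dict.mk y).contains e.1 = true := by
      rw [PySem.Dict.contains_eq_isSome_get?, hyget]; rfl
    have hygd : (PySem.Dict.mk y).getD e.1 (0, "") = e.2 :=
      PySem.Dict.getD_of_get?_eq_some _ _ hyget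
    have hxa : (x.any fun p => p.1 == e.1) = false := by simpa using hxc
    have hya : (y.any fun p => p.1 == e.1) = true := by simpa using hyc
    simp [hxa, hya, hygd]
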